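-- pv_equiv track=rewrite | github.com/jokerofcassinos/DubaiMatrixASI | core/agents/tensor_graph.py | _outer_product_3
-- ===== SOURCE A (Python) =====
-- def _outer_product_3(a: list, b: list, c: list) -> list:
--     """3D outer product: result[i][j][k] = a[i] * b[j] * c[k]."""
--     result = []
--     for ai in a:
--         plane = []
--         for bj in b:
--             plane.append([ai * bj * ck for ck in c])
--         result.append(plane)
--     return result
-- ===== SOURCE B (Python) =====
-- def _outer_product_3(a: list, b: list, c: list) -> list:
--     """Linearized: fill one flat list of length len(a)*len(b)*len(c), unranking each
--     linear index t into (i, j, k) by division/modulo, then reshape it by slicing."""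
--     na, nb, nc = len(a), len(b), len(c)
--     plane = nb * nc
--     flat = [a[t // plane] * b[t % plane // nc] * c[t % nc]
--             for t in range(na * plane)]
--     return [[flat[(i * nb + j) * nc:(i * nb + j + 1) * nc] for j in range(nb)]
--             for i in range(na)]
-- ===== Notes on version B (the rewrite author's own statement) =====
-- stated objective: alternative
-- what changed: B linearizes the problem: it fills one flat product list of length |a|*|b|*|c| by unranking each linear index t into (i,j,k) with //-and-% arithmetic, then reshapes that flat list into the 3D result by slicing, instead of A's three nested loops with appends.
import Mathlib
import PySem

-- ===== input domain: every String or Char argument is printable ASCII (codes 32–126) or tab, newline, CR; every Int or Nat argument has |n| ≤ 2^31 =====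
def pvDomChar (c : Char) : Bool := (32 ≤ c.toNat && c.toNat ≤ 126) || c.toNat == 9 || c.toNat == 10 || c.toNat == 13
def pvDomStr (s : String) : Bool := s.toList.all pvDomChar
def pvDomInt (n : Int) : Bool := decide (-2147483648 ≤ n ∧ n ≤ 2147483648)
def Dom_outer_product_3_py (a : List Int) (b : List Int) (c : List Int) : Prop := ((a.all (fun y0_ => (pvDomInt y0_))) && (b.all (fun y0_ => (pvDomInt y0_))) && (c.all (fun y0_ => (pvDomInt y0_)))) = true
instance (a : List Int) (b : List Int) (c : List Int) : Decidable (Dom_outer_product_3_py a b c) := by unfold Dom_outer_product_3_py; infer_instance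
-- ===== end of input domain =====

-- B fills one flat product list indexed linearly (unranking t into (i,j,k) by // and %)
-- and reshapes it into 3D by slicing; A is three nested appending loops. Objective: alternative.

-- ===== PORT A =====
-- literal transliteration of A's accumulating loops (list.append ↔ acc ++ [·])
def outer_product_3_py (a : List Int) (b : List Int) (c : List Int) : List (List (List Int)) :=
  a.foldl (fun result ai =>
    result ++ [b.foldl (fun plane bj =>
      plane ++ [c.map (fun ck => ai * bj * ck)]) []]) []

-- ===== PORT B =====
-- transliteration of Source B: flat comprehension over range(na*plane) with // and % unranking,
-- then slicing the flat list back into planes and rows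
def outer_product_3_py_alt (a : List Int) (b : List Int) (c : List Int) : List (List (List Int)) :=
  let na : Int := a.length
  let nb : Int := b.length
  let nc : Int := c.length
  let plane : Int := nb * nc
  let flat : List Int := (PySem.List.pyRange 0 (na * plane) 1).map (fun t =>
    PySem.List.pyGetD a (PySem.Int.floordiv t plane) 0 *
    PySem.List.pyGetD b (PySem.Int.floordiv (PySem.Int.mod t plane) nc) 0 *
    PySem.List.pyGetD c (PySem.Int.mod t nc) 0)
  (PySem.List.pyRange 0 na 1).map (fun i =>
    (PySem.List.pyRange 0 nb 1).map (fun j =>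
      PySem.List.slice flat (some ((i * nb + j) * nc)) (some ((i * nb + j + 1) * nc))))

-- ===== PRECONDITION & SPEC =====
def Spec_outer_product_3_py (a : List Int) (b : List Int) (c : List Int) (out : List (List (List Int))) : Prop := out = outer_product_3_py_alt a b c
instance (a : List Int) (b : List Int) (c : List Int) (out : List (List (List Int))) : Decidable (Spec_outer_product_3_py a b c out) := by unfold Spec_outer_product_3_py; infer_instance

-- ===== CLAIM (what is proved, stated in full; the proofs are below) =====
def Claim_equal_outer_product_3_py : Prop := ∀ (a : List Int) (b : List Int) (c : List Int), Dom_outer_product_3_py a b c → Spec_outer_product_3_py a b c (outer_product_3_py a b c)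

-- ===== LEMMAS AND PROOFS =====

-- B's flat-list-and-slice construction equals the nested-map closed form
theorem alt_eq_nested (a b c : List Int) :
    outer_product_3_py_alt a b c
      = a.map (fun ai => b.map (fun bj => c.map (fun ck => ai * bj * ck))) := by
  unfold outer_product_3_py_alt
  simp only []
  have hP : ((a.length : Int) * ((b.length : Int) * (c.length : Int)))
      = ((a.length * (b.length * c.length) : Nat) : Int) := by push_cast; ring
  rw [hP, PySem.List.pyRange_zero_natCast, PySem.List.pyRange_zero_natCast,
      PySem.List.pyRange_zero_natCast, List.map_map, List.map_map]
  apply List.ext_getElem (by simp)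
  intro i hi _
  simp only [List.getElem_map, List.getElem_range, Function.comp_apply]
  have hiA : i < a.length := by simpa using hi
  apply List.ext_getElem (by simp)
  intro j hj _
  simp only [List.getElem_map, List.getElem_range]
  have hjB : j < b.length := by simpa [List.length_range] using hj
  -- rewrite the slice bounds as nat casts
  have hlo : ((i : Int) * (b.length : Int) + (j : Int)) * (c.length : Int)
      = (((i * b.length + j) * c.length : Nat) : Int) := by push_cast; ring
  have hhi : ((i : Int) * (b.length : Int) + (j : Int) + 1) * (c.length : Int)
      = (((i * b.length + j) * c.length : Nat) : Int) + ((c.length : Nat) : Int) := by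
    push_cast; ring
  rw [hlo, hhi, PySem.List.slice_natCast_add]
  have hsC : (i * b.length + j) * c.length + c.length ≤ a.length * (b.length * c.length) := by
    calc (i * b.length + j) * c.length + c.length = (i * b.length + j + 1) * c.length := by ring
    _ ≤ (a.length * b.length) * c.length := by
        apply Nat.mul_le_mul_right
        calc i * b.length + j + 1 ≤ i * b.length + b.length := by omega
        _ = (i + 1) * b.length := by ring
        _ ≤ a.length * b.length := Nat.mul_le_mul_right _ hiA
    _ = a.length * (b.length * c.length) := by ring
  apply List.ext_getElem
  · simp; omega
  intro k hk _
  have hkC : k < c.length := (by simpa using hk : k < c.length ∧ _).1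
  have hCpos : 0 < c.length := Nat.pos_of_ne_zero (by omega)
  rw [List.getElem_take, List.getElem_drop, List.getElem_map, List.getElem_range]
  simp only [Function.comp_apply]
  have hBC : ((b.length : Int) * (c.length : Int)) = ((b.length * c.length : Nat) : Int) := by
    push_cast; ring
  rw [hBC]
  simp only [PySem.Int.mod_natCast, PySem.Int.floordiv_natCast, PySem.List.pyGetD_natCast]
  have hBpos : 0 < b.length := by omega
  have hBCpos : 0 < b.length * c.length := Nat.mul_pos hBpos hCpos
  have hr : j * c.length + k < b.length * c.length := by
    calc j * c.length + k < j * c.length + c.length := by omega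
    _ = (j + 1) * c.length := by ring
    _ ≤ b.length * c.length := Nat.mul_le_mul_right _ (by omega)
  have e1 : (i * b.length + j) * c.length + k
      = (j * c.length + k) + (b.length * c.length) * i := by ring
  have h1 : ((i * b.length + j) * c.length + k) / (b.length * c.length) = i := by
    rw [e1, Nat.add_mul_div_left _ _ hBCpos, Nat.div_eq_of_lt hr]; omega
  have e1' : (i * b.length + j) * c.length + k
      = (j * c.length + k) + i * (b.length * c.length) := by ring
  have h2 : ((i * b.length + j) * c.length + k) % (b.length * c.length)
      = j * c.length + k := by
    rw [e1', Nat.add_mul_mod_self_right, Nat.mod_eq_of_lt hr]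
  have e2 : j * c.length + k = k + c.length * j := by ring
  have h2' : (j * c.length + k) / c.length = j := by
    rw [e2, Nat.add_mul_div_left _ _ hCpos, Nat.div_eq_of_lt hkC]; omega
  have e3 : (i * b.length + j) * c.length + k = k + (i * b.length + j) * c.length := by ring
  have h3 : ((i * b.length + j) * c.length + k) % c.length = k := by
    rw [e3, Nat.add_mul_mod_self_right, Nat.mod_eq_of_lt hkC]
  rw [h1, h2, h2', h3, List.getD_eq_getElem a 0 hiA, List.getD_eq_getElem b 0 hjB,
      List.getD_eq_getElem c 0 hkC, List.getElem_map]

-- ===== VERDICT (by name: the statement is the Claim_ definition above) =====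
theorem outer_product_3_py_spec : Claim_equal_outer_product_3_py := by
  intro a b c _
  unfold Spec_outer_product_3_py outer_product_3_py
  rw [alt_eq_nested]
  simp only [PySem.List.foldl_append_singleton_eq_map, List.nil_append]
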